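-- pv_equiv track=rewrite | github.com/IBM/PowerVS_watsonx_SatelliteConnectorBasedToolkit | utils/utils.py | remove_pii
-- ===== SOURCE A (Python) =====
-- def remove_pii(data, pii_keys=None):
--     if pii_keys is None:
--         pii_keys = ['username', 'date_of_birth', 'address', 'email','password', 'first_name', 'last_name']
--
--     cleaned_data = []
--     for record in data:
--         filtered_record = {k: v for k, v in record.items() if k not in pii_keys}
--         cleaned_data.append(filtered_record)
--
--     return cleaned_data
-- ===== SOURCE B (Python) =====
-- def _scrub(record, keys):
--     copy = dict(record)
--     for k in keys:
--         copy.pop(k, None)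
--     return copy
--
--
-- def remove_pii(data, pii_keys=None):
--     keys = ['username', 'date_of_birth', 'address', 'email', 'password',
--             'first_name', 'last_name'] if pii_keys is None else pii_keys
--     return [_scrub(record, keys) for record in data]
-- ===== Notes on version B (the rewrite author's own statement) =====
-- stated objective: faster
-- what changed: Instead of scanning every key of every record and testing list membership against the PII list, B copies each record and subtracts the fixed PII keys with dict.pop(k, None), building the output with a comprehension over a helper.
import Mathlib
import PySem

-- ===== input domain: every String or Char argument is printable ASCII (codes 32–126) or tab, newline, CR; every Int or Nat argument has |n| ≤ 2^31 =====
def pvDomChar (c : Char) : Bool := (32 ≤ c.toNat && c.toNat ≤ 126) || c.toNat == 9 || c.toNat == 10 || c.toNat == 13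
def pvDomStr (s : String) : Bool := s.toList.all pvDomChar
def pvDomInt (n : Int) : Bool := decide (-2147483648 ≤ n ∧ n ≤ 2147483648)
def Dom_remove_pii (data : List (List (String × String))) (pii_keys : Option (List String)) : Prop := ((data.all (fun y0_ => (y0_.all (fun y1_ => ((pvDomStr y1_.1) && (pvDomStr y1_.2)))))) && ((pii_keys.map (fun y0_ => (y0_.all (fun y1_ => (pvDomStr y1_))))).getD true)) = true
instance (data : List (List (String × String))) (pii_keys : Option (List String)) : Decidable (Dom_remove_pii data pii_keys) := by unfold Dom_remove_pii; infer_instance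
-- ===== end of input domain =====

-- B replaces A's per-record membership-filter scan by copying each record and
-- subtracting the fixed PII keys with dict.pop(k, None); same results, alternative shape.

-- ===== PORT A =====
def remove_pii (data : List (List (String × String))) (pii_keys : Option (List String)) : List (List (String × String)) :=
  let keys := match pii_keys with
    | none => ["username", "date_of_birth", "address", "email", "password", "first_name", "last_name"]
    | some ks => ks
  -- for record in data: cleaned_data.append({k: v for k, v in record.items() if k not in pii_keys})
  data.foldl (fun cleaned record =>
    cleaned ++ [record.filter (fun kv => !(keys.contains kv.1))]) []

-- ===== PORT B =====
-- _scrub: copy = dict(record); for k in keys: copy.pop(k, None); return copy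
def pvScrub (record : List (String × String)) (keys : List String) : List (String × String) :=
  (keys.foldl (fun d k => PySem.Dict.erase d k) (PySem.Dict.mk record)).items

def remove_pii_alt (data : List (List (String × String))) (pii_keys : Option (List String)) : List (List (String × String)) :=
  let keys := match pii_keys with
    | none => ["username", "date_of_birth", "address", "email", "password", "first_name", "last_name"]
    | some ks => ks
  data.map (fun record => pvScrub record keys)

-- ===== PRECONDITION & SPEC =====
def Spec_remove_pii (data : List (List (String × String))) (pii_keys : Option (List String)) (out : List (List (String × String))) : Prop := out = remove_pii_alt data pii_keys
instance (data : List (List (String × String))) (pii_keys : Option (List String)) (out : List (List (String × String))) : Decidable (Spec_remove_pii data pii_keys out) := by unfold Spec_remove_pii; infer_instance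

-- ===== CLAIM (what is proved, stated in full; the proofs are below) =====
def Claim_equal_remove_pii : Prop := ∀ (data : List (List (String × String))) (pii_keys : Option (List String)), Dom_remove_pii data pii_keys → Spec_remove_pii data pii_keys (remove_pii data pii_keys)

-- ===== LEMMAS AND PROOFS =====

-- Folding `erase` over the key list is the same as one filter by non-membership.
theorem pvScrub_eq_filter (keys : List String) (record : List (String × String)) :
    pvScrub record keys = record.filter (fun kv => !(keys.contains kv.1)) := by
  unfold pvScrub
  induction keys generalizing record with
  | nil => simp
  | cons k ks ih =>
    rw [List.foldl_cons,
      show PySem.Dict.erase (PySem.Dict.mk record) k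
          = PySem.Dict.mk (record.filter (fun p => !(p.1 == k))) from rfl, ih]
    rw [List.filter_filter]
    apply List.filter_congr
    intro kv _
    simp only [List.contains_cons, Bool.not_or]
    rw [Bool.and_comm]

-- ===== VERDICT (by name: the statement is the Claim_ definition above) =====
theorem remove_pii_spec : Claim_equal_remove_pii := by
  intro data pii_keys _
  unfold Spec_remove_pii remove_pii remove_pii_alt
  rw [PySem.List.foldl_append_singleton_eq_map]
  exact List.map_congr_left (fun record _ => (pvScrub_eq_filter _ record).symm)
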